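-- pv_equiv track=rewrite | github.com/Dimm-ddr/loudlyproud | .tools/tags/registry.py | normalize_tag
-- ===== SOURCE A (Python) =====
-- def normalize_tag(tag: str, normalization_rules: dict) -> str:
--     """
--     Normalize a tag using the provided normalization rules.
--
--     Args:
--         tag: The tag to normalize
--         normalization_rules: Dictionary containing normalization patterns
--
--     Returns:
--         The normalized tag
--     """
--     # Convert to lowercase for consistent comparison
--     tag_lower = tag.lower().strip()
--
--     # Check direct normalizations
--     if "normalizations" in normalization_rules:
--         if tag_lower in normalization_rules["normalizations"]:
--             return normalization_rules["normalizations"][tag_lower]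
--
--     # Check URL normalizations
--     if "url_normalizations" in normalization_rules:
--         if tag in normalization_rules["url_normalizations"]:
--             return normalization_rules["url_normalizations"][tag]
--
--     # Default normalization: lowercase and replace spaces/special chars with hyphens
--     normalized = tag_lower.replace(" ", "-")
--     # Remove any non-alphanumeric characters (except hyphens)
--     normalized = "".join(c for c in normalized if c.isalnum() or c == "-")
--     # Remove multiple consecutive hyphens and trailing/leading hyphens
--     while "--" in normalized:
--         normalized = normalized.replace("--", "-")
--     return normalized.strip("-")
-- ===== SOURCE B (Python) =====
-- def normalize_tag(tag: str, normalization_rules: dict) -> str: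
--     tag_lower = tag.lower().strip()
--
--     norms = normalization_rules.get("normalizations")
--     if norms is not None and tag_lower in norms:
--         return norms[tag_lower]
--
--     url_norms = normalization_rules.get("url_normalizations")
--     if url_norms is not None and tag in url_norms:
--         return url_norms[tag]
--
--     # Single pass: keep alphanumerics and separators, turning spaces into hyphens,
--     # then rebuild from the non-empty hyphen-separated pieces.
--     cleaned = "".join("-" if c == " " else c
--                       for c in tag_lower if c.isalnum() or c in " -")
--     return "-".join(piece for piece in cleaned.split("-") if piece)
-- ===== Notes on version B (the rewrite author's own statement) =====
-- stated objective: simpler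
-- what changed: The default path's repeated replace("--","-") while-loop plus strip("-") is replaced by one pass that keeps alnum/space/hyphen chars (spaces becoming hyphens) and then rejoins the non-empty pieces of a split on '-'; the two rule-dict guards are kept.
import Mathlib
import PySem

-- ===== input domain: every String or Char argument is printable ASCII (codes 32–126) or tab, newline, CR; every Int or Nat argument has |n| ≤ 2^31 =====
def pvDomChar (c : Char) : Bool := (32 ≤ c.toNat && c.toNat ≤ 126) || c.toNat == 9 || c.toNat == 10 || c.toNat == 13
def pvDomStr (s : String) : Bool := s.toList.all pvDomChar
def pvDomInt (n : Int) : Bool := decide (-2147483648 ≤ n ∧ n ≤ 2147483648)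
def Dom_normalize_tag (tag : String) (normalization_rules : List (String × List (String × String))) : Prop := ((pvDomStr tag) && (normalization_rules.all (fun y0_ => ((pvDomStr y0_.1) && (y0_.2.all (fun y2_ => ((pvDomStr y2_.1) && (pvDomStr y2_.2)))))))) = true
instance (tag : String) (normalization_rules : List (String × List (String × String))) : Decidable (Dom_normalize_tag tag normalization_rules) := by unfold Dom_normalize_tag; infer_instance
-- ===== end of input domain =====

-- B replaces A's repeated replace("--","-") loop plus strip("-") by a single split-on-'-' / join-non-empty-pieces pass (objective: simpler); return value only.

-- ===== PORT A =====
-- helpers characterising one `normalized.replace("--", "-")` step; cited by pvCollapse's termination proof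
def pvHasDD : List Char → Bool
  | [] => false
  | c :: r => (c == '-' && r.head? == some '-') || pvHasDD r

def pvReplaceDD : List Char → List Char
  | [] => []
  | [c] => [c]
  | c :: d :: r => if c == '-' && d == '-' then '-' :: pvReplaceDD r else c :: pvReplaceDD (d :: r)

theorem pvHasDD_cons (c : Char) (r : List Char) :
    pvHasDD (c :: r) = ((c == '-' && r.head? == some '-') || pvHasDD r) := rfl

theorem pvReplaceDD_cons₂ (c d : Char) (r : List Char) :
    pvReplaceDD (c :: d :: r) =
      if c == '-' && d == '-' then '-' :: pvReplaceDD r else c :: pvReplaceDD (d :: r) := rfl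

theorem pv_pre_dd_cons (c d : Char) (r : List Char) :
    (['-', '-'].isPrefixOf (c :: d :: r)) = ('-' == c && ('-' == d && true)) := rfl

theorem pv_pre_dd_one (c : Char) : (['-', '-'].isPrefixOf [c]) = ('-' == c && false) := rfl

theorem pv_replace_dd (cs : List Char) :
    PySem.Chars.replace cs ['-', '-'] ['-'] = pvReplaceDD cs := by
  have hgo : ∀ (fuel : ℕ) (l acc : List Char), l.length ≤ fuel →
      PySem.Chars.replace.go ['-', '-'] ['-'] fuel l acc = acc.reverse ++ pvReplaceDD l := by
    intro fuel
    induction fuel with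
    | zero =>
      intro l acc h
      have hl : l = [] := List.eq_nil_of_length_eq_zero (Nat.le_zero.mp h)
      subst hl
      simp [PySem.Chars.replace.go, pvReplaceDD]
    | succ n ih =>
      intro l acc h
      match l with
      | [] => simp [PySem.Chars.replace.go, pvReplaceDD]
      | [c] =>
        rw [PySem.Chars.replace.go]
        rw [if_neg (by rw [pv_pre_dd_one]; simp)]
        rw [ih [] (c :: acc) (by simp)]
        simp [pvReplaceDD]
      | c :: d :: r =>
        rw [PySem.Chars.replace.go]
        simp only [List.length_cons] at h
        cases hcd : (c == '-' && d == '-') with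
        | true =>
          have hc : c = '-' := by
            have := (Bool.and_eq_true _ _).mp hcd
            exact beq_iff_eq.mp this.1
          have hd : d = '-' := by
            have := (Bool.and_eq_true _ _).mp hcd
            exact beq_iff_eq.mp this.2
          subst hc; subst hd
          rw [if_pos (by rw [pv_pre_dd_cons]; simp)]
          rw [ih (List.drop ['-', '-'].length ('-' :: '-' :: r)) (['-'].reverse ++ acc)
            (by simp; omega)]
          rw [pvReplaceDD_cons₂, if_pos (by simp)]
          simp
        | false =>
          rw [if_neg (by
            rw [pv_pre_dd_cons]
            simp only [Bool.and_true, Bool.and_eq_true, beq_iff_eq]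
            intro hco
            rw [← hco.1, ← hco.2] at hcd
            simp at hcd)]
          rw [ih (d :: r) (c :: acc) (by simp; omega)]
          rw [pvReplaceDD_cons₂, if_neg (by simp [hcd])]
          simp
  rw [PySem.Chars.replace]
  rw [if_neg (by decide)]
  simpa using hgo cs.length cs [] le_rfl

theorem pv_isIn_dd (cs : List Char) :
    PySem.Chars.isIn ['-', '-'] cs = pvHasDD cs := by
  have hiff : pvHasDD cs = true ↔ ['-', '-'] <:+: cs := by
    induction cs with
    | nil => simp [pvHasDD]
    | cons c r ih =>
      rw [List.infix_cons_iff, pvHasDD_cons]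
      constructor
      · intro h
        simp only [Bool.or_eq_true, Bool.and_eq_true, beq_iff_eq] at h
        rcases h with ⟨hc, hh⟩ | h
        · left
          match r, hh with
          | d :: r', hh =>
            simp only [List.head?_cons, Option.some.injEq] at hh
            subst hc; subst hh
            exact ⟨r', rfl⟩
        · right; exact ih.mp h
      · intro h
        simp only [Bool.or_eq_true, Bool.and_eq_true, beq_iff_eq]
        rcases h with hpre | hinf
        · left
          rcases hpre with ⟨t, ht⟩
          match r, ht with
          | d :: r', ht =>
            simp only [List.cons_append, List.cons.injEq] at ht
            exact ⟨ht.1.symm, by simp [← ht.2.1]⟩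
        · right; exact ih.mpr hinf
  cases hdd : pvHasDD cs with
  | true => exact (PySem.Chars.isIn_iff_infix _ _).mpr (hiff.mp hdd)
  | false =>
    refine (PySem.Chars.isIn_eq_false_iff _ _).mpr ?_
    intro hinf
    rw [hiff.mpr hinf] at hdd
    exact Bool.true_eq_false.mp hdd

theorem pvReplaceDD_lt (cs : List Char) (h : pvHasDD cs = true) :
    (pvReplaceDD cs).length < cs.length := by
  have hle : ∀ xs : List Char, (pvReplaceDD xs).length ≤ xs.length := by
    intro xs
    fun_induction pvReplaceDD xs with
    | case1 => simp [pvReplaceDD]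
    | case2 c => simp [pvReplaceDD]
    | case3 c d r hcd ih =>
      simp only [List.length_cons] at ih ⊢
      omega
    | case4 c d r hcd ih =>
      simp only [List.length_cons] at ih ⊢
      omega
  fun_induction pvReplaceDD cs with
  | case1 => simp [pvHasDD] at h
  | case2 c =>
    rw [pvHasDD_cons] at h
    simp [pvHasDD] at h
  | case3 c d r hcd ih =>
    have := hle r
    simp only [List.length_cons] at this ⊢
    omega
  | case4 c d r hcd ih =>
    have hdr : pvHasDD (d :: r) = true := by
      rw [pvHasDD_cons] at h
      rcases (Bool.or_eq_true _ _).mp h with hbad | hgood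
      · exfalso
        apply hcd
        simp only [List.head?_cons, Bool.and_eq_true, beq_iff_eq] at hbad
        simp only [Option.some.injEq] at hbad
        simp [hbad.1, hbad.2]
      · exact hgood
    have := ih hdr
    simp only [List.length_cons] at this ⊢
    omega

-- the `while "--" in normalized:` loop of A
def pvCollapse (cs : List Char) : List Char :=
  if PySem.Chars.isIn ['-', '-'] cs then pvCollapse (PySem.Chars.replace cs ['-', '-'] ['-']) else cs
termination_by cs.length
decreasing_by
  rename_i h
  rw [pv_replace_dd]
  exact pvReplaceDD_lt cs (by rw [← pv_isIn_dd]; exact h)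

def normalize_tag (tag : String) (normalization_rules : List (String × List (String × String))) : String :=
  let tag_lower := PySem.Str.strip (PySem.Str.lower tag)
  let d := PySem.Dict.mk normalization_rules
  let n1 : Option String :=
    if d.contains "normalizations" then
      let inner := PySem.Dict.mk ((d.get? "normalizations").getD [])
      if inner.contains tag_lower then inner.get? tag_lower else none
    else none
  match n1 with
  | some v => v
  | none =>
    let n2 : Option String :=
      if d.contains "url_normalizations" then
        let inner := PySem.Dict.mk ((d.get? "url_normalizations").getD [])
        if inner.contains tag then inner.get? tag else none
      else none
    match n2 with
    | some v => v
    | none =>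
      let normalized := PySem.Chars.replace tag_lower.toList [' '] ['-']
      let normalized := normalized.filter (fun c => PySem.Chars.isalnum c || c == '-')
      String.ofList (PySem.Chars.stripChars (pvCollapse normalized) ['-'])

-- ===== PORT B =====
def pvDefaultB (tag_lower : String) : String :=
  let cleaned := (tag_lower.toList.filter
      (fun c => PySem.Chars.isalnum c || c == ' ' || c == '-')).map
      (fun c => if c == ' ' then '-' else c)
  String.ofList (PySem.Chars.join ['-'] ((PySem.Chars.splitOn cleaned ['-']).filter (fun p => !p.isEmpty)))

def normalize_tag_alt (tag : String) (normalization_rules : List (String × List (String × String))) : String :=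
  let tag_lower := PySem.Str.strip (PySem.Str.lower tag)
  let d := PySem.Dict.mk normalization_rules
  let r1 : Option String :=
    match d.get? "normalizations" with
    | some norms => (PySem.Dict.mk norms).get? tag_lower
    | none => none
  match r1 with
  | some v => v
  | none =>
    let r2 : Option String :=
      match d.get? "url_normalizations" with
      | some url_norms => (PySem.Dict.mk url_norms).get? tag
      | none => none
    match r2 with
    | some v => v
    | none => pvDefaultB tag_lower

-- ===== PRECONDITION & SPEC =====
def Spec_normalize_tag (tag : String) (normalization_rules : List (String × List (String × String))) (out : String) : Prop := out = normalize_tag_alt tag normalization_rules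
instance (tag : String) (normalization_rules : List (String × List (String × String))) (out : String) : Decidable (Spec_normalize_tag tag normalization_rules out) := by unfold Spec_normalize_tag; infer_instance

-- ===== CLAIM (what is proved, stated in full; the proofs are below) =====
def Claim_equal_normalize_tag : Prop := ∀ (tag : String) (normalization_rules : List (String × List (String × String))), Dom_normalize_tag tag normalization_rules → Spec_normalize_tag tag normalization_rules (normalize_tag tag normalization_rules)

-- ===== LEMMAS AND PROOFS =====

-- hyphen-run squeezing: the common fixed point of A's replace("--","-") loop
def pvSqueeze : List Char → List Char
  | [] => []
  | c :: r => if c == '-' && r.head? == some '-' then pvSqueeze r else c :: pvSqueeze r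

-- maximal non-hyphen runs
def pvTokens : List Char → List (List Char)
  | [] => []
  | c :: r =>
    if c == '-' then pvTokens r
    else (c :: r.takeWhile (· != '-')) :: pvTokens (r.dropWhile (· != '-'))
termination_by l => l.length
decreasing_by
  · simp
  · simp only [List.length_cons]
    exact Nat.lt_succ_of_le (List.length_dropWhile_le _ _)

-- Python's cleaned.split("-")
def pvSplitH : List Char → List (List Char)
  | [] => [[]]
  | c :: r =>
    if c == '-' then [] :: pvSplitH r
    else match pvSplitH r with
      | p :: ps => (c :: p) :: ps
      | [] => [[c]]

def pvLstrip (xs : List Char) : List Char := xs.dropWhile (· == '-')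
def pvRstrip (xs : List Char) : List Char := (xs.reverse.dropWhile (· == '-')).reverse

theorem pv_pre_one (a c : Char) (t : List Char) :
    ([a].isPrefixOf (c :: t)) = (a == c && true) := rfl


theorem pvSqueeze_cons (c : Char) (r : List Char) :
    pvSqueeze (c :: r) =
      if c == '-' && r.head? == some '-' then pvSqueeze r else c :: pvSqueeze r := rfl

theorem pvSplitH_cons (c : Char) (r : List Char) :
    pvSplitH (c :: r) =
      if c == '-' then [] :: pvSplitH r
      else match pvSplitH r with
        | p :: ps => (c :: p) :: ps
        | [] => [[c]] := rfl

theorem pv_squeeze_dash (xs : List Char) :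
    pvSqueeze ('-' :: xs) = '-' :: pvSqueeze (xs.dropWhile (· == '-')) := by
  induction xs with
  | nil => simp [pvSqueeze]
  | cons x t ih =>
    cases hx : (x == '-') with
    | true =>
      have hx' : x = '-' := beq_iff_eq.mp hx
      subst hx'
      have h1 : pvSqueeze ('-' :: '-' :: t) = pvSqueeze ('-' :: t) := by
        rw [pvSqueeze_cons]; simp
      rw [h1, ih]
      simp [List.dropWhile_cons]
    | false =>
      have h1 : pvSqueeze ('-' :: x :: t) = '-' :: pvSqueeze (x :: t) := by
        rw [pvSqueeze_cons]; simp [hx]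
      rw [h1]
      simp [List.dropWhile_cons, hx]

theorem pv_rep_head (x : Char) (xs : List Char) :
    (pvReplaceDD (x :: xs)).head? = some x := by
  match xs with
  | [] => simp [pvReplaceDD]
  | d :: r =>
    cases hb : (x == '-' && d == '-') with
    | true =>
      have hx : x = '-' := beq_iff_eq.mp ((Bool.and_eq_true _ _).mp hb).1
      rw [pvReplaceDD_cons₂, if_pos hb]
      simp [hx]
    | false =>
      rw [pvReplaceDD_cons₂, if_neg (by simp [hb])]
      simp

theorem pv_rep_dropWhile : ∀ (n : ℕ) (cs : List Char), cs.length ≤ n →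
    (pvReplaceDD cs).dropWhile (· == '-') = pvReplaceDD (cs.dropWhile (· == '-')) := by
  intro n
  induction n with
  | zero =>
    intro cs h
    have hl : cs = [] := List.eq_nil_of_length_eq_zero (Nat.le_zero.mp h)
    subst hl; rfl
  | succ n ih =>
    intro cs h
    match cs with
    | [] => rfl
    | [c] =>
      cases hc : (c == '-') with
      | true =>
        have hc' : c = '-' := beq_iff_eq.mp hc
        subst hc'
        simp [pvReplaceDD, List.dropWhile_cons]
      | false =>
        simp [pvReplaceDD, List.dropWhile_cons, hc]
    | c :: d :: r =>
      simp only [List.length_cons] at h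
      cases hcd : (c == '-' && d == '-') with
      | true =>
        have hc : c = '-' := beq_iff_eq.mp ((Bool.and_eq_true _ _).mp hcd).1
        have hd : d = '-' := beq_iff_eq.mp ((Bool.and_eq_true _ _).mp hcd).2
        subst hc; subst hd
        have e1 : pvReplaceDD ('-' :: '-' :: r) = '-' :: pvReplaceDD r := by
          rw [pvReplaceDD_cons₂, if_pos hcd]
        rw [e1]
        have e2 : List.dropWhile (· == '-') ('-' :: pvReplaceDD r) =
            List.dropWhile (· == '-') (pvReplaceDD r) := by
          simp [List.dropWhile_cons]
        rw [e2, ih r (by omega)]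
        have e3 : List.dropWhile (· == '-') ('-' :: '-' :: r) =
            List.dropWhile (· == '-') r := by
          simp [List.dropWhile_cons]
        rw [e3]
      | false =>
        have e1 : pvReplaceDD (c :: d :: r) = c :: pvReplaceDD (d :: r) := by
          rw [pvReplaceDD_cons₂, if_neg (by simp [hcd])]
        rw [e1]
        cases hc : (c == '-') with
        | true =>
          have hc' : c = '-' := beq_iff_eq.mp hc
          subst hc'
          have hdb : (d == '-') = false := by
            cases hd : (d == '-') with
            | true => rw [hd] at hcd; simp at hcd
            | false => rfl
          have e2 : List.dropWhile (· == '-') ('-' :: pvReplaceDD (d :: r)) =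
              List.dropWhile (· == '-') (pvReplaceDD (d :: r)) := by
            simp [List.dropWhile_cons]
          rw [e2, ih (d :: r) (by simp; omega)]
          have e3 : List.dropWhile (· == '-') ('-' :: d :: r) = d :: r := by
            simp [List.dropWhile_cons, hdb]
          have e4 : List.dropWhile (· == '-') (d :: r) = d :: r := by
            simp [List.dropWhile_cons, hdb]
          rw [e3, e4]
        | false =>
          have e2 : List.dropWhile (· == '-') (c :: pvReplaceDD (d :: r)) =
              c :: pvReplaceDD (d :: r) := by
            simp [List.dropWhile_cons, hc]
          have e3 : List.dropWhile (· == '-') (c :: d :: r) = c :: d :: r := by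
            simp [List.dropWhile_cons, hc]
          rw [e2, e3, e1]

theorem pv_squeeze_rep : ∀ (n : ℕ) (cs : List Char), cs.length ≤ n →
    pvSqueeze (pvReplaceDD cs) = pvSqueeze cs := by
  intro n
  induction n with
  | zero =>
    intro cs h
    have hl : cs = [] := List.eq_nil_of_length_eq_zero (Nat.le_zero.mp h)
    subst hl; rfl
  | succ n ih =>
    intro cs h
    match cs with
    | [] => rfl
    | [c] => rfl
    | c :: d :: r =>
      simp only [List.length_cons] at h
      cases hcd : (c == '-' && d == '-') with
      | true =>
        have hc : c = '-' := beq_iff_eq.mp ((Bool.and_eq_true _ _).mp hcd).1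
        have hd : d = '-' := beq_iff_eq.mp ((Bool.and_eq_true _ _).mp hcd).2
        subst hc; subst hd
        have e1 : pvReplaceDD ('-' :: '-' :: r) = '-' :: pvReplaceDD r := by
          rw [pvReplaceDD_cons₂, if_pos hcd]
        rw [e1, pv_squeeze_dash]
        have h2 : pvSqueeze ('-' :: '-' :: r) = pvSqueeze ('-' :: r) := by
          rw [pvSqueeze_cons]; simp
        rw [h2, pv_squeeze_dash]
        rw [pv_rep_dropWhile (n + 1) r (by omega)]
        congr 1
        exact ih (r.dropWhile (· == '-')) (le_trans (List.length_dropWhile_le _ _) (by omega))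
      | false =>
        have e1 : pvReplaceDD (c :: d :: r) = c :: pvReplaceDD (d :: r) := by
          rw [pvReplaceDD_cons₂, if_neg (by simp [hcd])]
        rw [e1]
        have hhead := pv_rep_head d r
        have h2 : pvSqueeze (c :: pvReplaceDD (d :: r)) =
            c :: pvSqueeze (pvReplaceDD (d :: r)) := by
          rw [pvSqueeze_cons, hhead]
          rw [if_neg (by simp [hcd])]
        rw [h2, ih (d :: r) (by simp; omega)]
        have h3 : pvSqueeze (c :: d :: r) = c :: pvSqueeze (d :: r) := by
          rw [pvSqueeze_cons]
          rw [if_neg (by simp [hcd])]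
        rw [h3]

theorem pv_noDD (cs : List Char) (h : pvHasDD cs = false) : pvSqueeze cs = cs := by
  induction cs with
  | nil => rfl
  | cons c r ih =>
    rw [pvHasDD_cons, Bool.or_eq_false_iff] at h
    rw [pvSqueeze_cons, h.1]
    rw [if_neg (by simp)]
    rw [ih h.2]

theorem pv_collapse_eq (cs : List Char) : pvCollapse cs = pvSqueeze cs := by
  fun_induction pvCollapse cs with
  | case1 cs h ih =>
    rw [ih, pv_replace_dd]
    exact pv_squeeze_rep cs.length cs le_rfl
  | case2 cs h =>
    rw [pv_isIn_dd] at h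
    exact (pv_noDD cs (by simpa using h)).symm

theorem pv_stripChars_eq (xs : List Char) :
    PySem.Chars.stripChars xs ['-'] = pvRstrip (pvLstrip xs) := by
  have hp : (fun c => (['-'] : List Char).contains c) = (fun c : Char => c == '-') := by
    funext c; simp only [List.contains_cons, List.contains_nil, Bool.or_false]
  simp only [PySem.Chars.stripChars, pvRstrip, pvLstrip, hp]

theorem pv_dropWhile_none {p : Char → Bool} (l : List Char) (h : ∀ c ∈ l, p c = false) :
    l.dropWhile p = l := by
  induction l with
  | nil => rfl
  | cons c t ih =>
    rw [List.dropWhile_cons]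
    rw [h c (by simp)]
    simp [ih (fun x hx => h x (by simp [hx]))]

theorem pv_rstrip_append (run X : List Char) (h : ∀ c ∈ run, (c == '-') = false) :
    pvRstrip (run ++ X) = run ++ pvRstrip X := by
  unfold pvRstrip
  rw [List.reverse_append, List.dropWhile_append]
  by_cases hX : (X.reverse.dropWhile (· == '-')).isEmpty
  · rw [if_pos hX]
    rw [pv_dropWhile_none run.reverse (fun c hc => h c (by simpa using hc))]
    simp only [List.isEmpty_iff] at hX
    simp [hX]
  · rw [if_neg hX]
    simp

theorem pv_rstrip_cons (a : Char) (xs : List Char) :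
    pvRstrip (a :: xs) =
      if (pvRstrip xs).isEmpty then (if a == '-' then [] else [a]) else a :: pvRstrip xs := by
  unfold pvRstrip
  rw [show (a :: xs).reverse = xs.reverse ++ [a] by simp]
  rw [List.dropWhile_append]
  by_cases hX : (xs.reverse.dropWhile (· == '-')).isEmpty
  · rw [if_pos hX]
    simp only [List.isEmpty_iff] at hX
    rw [if_pos (by simp [hX])]
    cases ha : (a == '-') with
    | true => simp [List.dropWhile_cons, ha]
    | false => simp [List.dropWhile_cons, ha]
  · rw [if_neg hX]
    simp only [List.isEmpty_iff] at hX
    rw [if_neg (by simpa using hX)]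
    simp

theorem pv_squeeze_head : ∀ (xs : List Char), xs ≠ [] → (pvSqueeze xs).head? = xs.head? := by
  intro xs
  induction xs with
  | nil => intro h; exact absurd rfl h
  | cons x t ih =>
    intro _
    match t, ih with
    | [], _ => simp [pvSqueeze]
    | d :: t', ih =>
      cases hx : (x == '-' && (d :: t').head? == some '-') with
      | true =>
        rw [pvSqueeze_cons, if_pos hx, ih (by simp)]
        simp only [List.head?_cons, Bool.and_eq_true, beq_iff_eq, Option.some.injEq] at hx
        simp [hx.1, hx.2]
      | false =>
        rw [pvSqueeze_cons, if_neg (by rw [hx]; simp)]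
        simp

theorem pv_squeeze_run (run rest : List Char) (h : ∀ c ∈ run, (c == '-') = false) :
    pvSqueeze (run ++ rest) = run ++ pvSqueeze rest := by
  induction run with
  | nil => rfl
  | cons c t ih =>
    have hc : (c == '-') = false := h c (by simp)
    simp only [List.cons_append]
    rw [pvSqueeze_cons, if_neg (by simp [hc])]
    rw [ih (fun x hx => h x (by simp [hx]))]

theorem pv_tokens_nil : pvTokens [] = [] := by simp [pvTokens]

theorem pv_tokens_cons_dash (t : List Char) : pvTokens ('-' :: t) = pvTokens t := by
  simp [pvTokens]

theorem pv_tokens_cons_ne (c : Char) (r : List Char) (hc : (c == '-') = false) :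
    pvTokens (c :: r) = (c :: r.takeWhile (· != '-')) :: pvTokens (r.dropWhile (· != '-')) := by
  have hc' : ¬ c = '-' := by simpa using hc
  simp [pvTokens, hc']

theorem pv_tokens_dropDash (r : List Char) :
    pvTokens (r.dropWhile (· == '-')) = pvTokens r := by
  induction r with
  | nil => rfl
  | cons x t ih =>
    cases hx : (x == '-') with
    | true =>
      have hx' : x = '-' := beq_iff_eq.mp hx
      subst hx'
      have h1 : List.dropWhile (· == '-') ('-' :: t) = List.dropWhile (· == '-') t := by
        simp [List.dropWhile_cons]
      rw [h1, ih, pv_tokens_cons_dash]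
    | false =>
      have h1 : List.dropWhile (· == '-') (x :: t) = x :: t := by
        simp [List.dropWhile_cons, hx]
      rw [h1]

theorem pv_tokens_ne_nil : ∀ (ds : List Char), ∀ t ∈ pvTokens ds, t ≠ [] := by
  intro ds
  fun_induction pvTokens ds with
  | case1 => intro t ht; simp at ht
  | case2 c r hc ih => intro t ht; exact ih t ht
  | case3 c r hc ih =>
    intro t ht
    rcases List.mem_cons.mp ht with rfl | ht'
    · simp
    · exact ih t ht'

theorem pv_intercalate_cons (x : List Char) (ts : List (List Char)) :
    List.intercalate ['-'] (x :: ts) =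
      x ++ (if ts.isEmpty then [] else '-' :: List.intercalate ['-'] ts) := by
  cases ts with
  | nil => simp [List.intercalate]
  | cons t ts' =>
    simp [List.intercalate, List.intersperse]

theorem pv_intercalate_empty_iff (ts : List (List Char)) (hne : ∀ t ∈ ts, t ≠ []) :
    (List.intercalate ['-'] ts).isEmpty = ts.isEmpty := by
  cases ts with
  | nil => simp [List.intercalate]
  | cons t ts' =>
    have ht : t ≠ [] := hne t (by simp)
    rw [pv_intercalate_cons]
    simp [ht]

theorem pv_dropWhile_head (l : List Char) (p : Char → Bool) :
    l.dropWhile p = [] ∨ ∃ e t, l.dropWhile p = e :: t ∧ p e = false := by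
  induction l with
  | nil => left; rfl
  | cons c t ih =>
    cases hc : p c with
    | true => simpa [List.dropWhile_cons, hc] using ih
    | false =>
      right
      exact ⟨c, t, by simp [List.dropWhile_cons, hc], hc⟩

theorem pv_M1 : ∀ (n : ℕ) (ds : List Char), ds.length ≤ n →
    pvRstrip (pvLstrip (pvSqueeze ds)) = List.intercalate ['-'] (pvTokens ds) := by
  intro n
  induction n with
  | zero =>
    intro ds h
    have hl : ds = [] := List.eq_nil_of_length_eq_zero (Nat.le_zero.mp h)
    subst hl
    simp [pvSqueeze, pvLstrip, pvRstrip, pv_tokens_nil, List.intercalate]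
  | succ n ih =>
    intro ds h
    match ds with
    | [] => simp [pvSqueeze, pvLstrip, pvRstrip, pv_tokens_nil, List.intercalate]
    | c :: r =>
      simp only [List.length_cons] at h
      cases hc : (c == '-') with
      | true =>
        have hc' : c = '-' := beq_iff_eq.mp hc
        subst hc'
        rw [pv_squeeze_dash]
        have hls : pvLstrip ('-' :: pvSqueeze (r.dropWhile (· == '-'))) =
            pvLstrip (pvSqueeze (r.dropWhile (· == '-'))) := by
          simp [pvLstrip, List.dropWhile_cons]
        rw [hls, ih (r.dropWhile (· == '-')) (le_trans (List.length_dropWhile_le _ _) (by omega))]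
        rw [pv_tokens_dropDash, pv_tokens_cons_dash]
      | false =>
        have hrun : ∀ x ∈ c :: r.takeWhile (· != '-'), (x == '-') = false := by
          intro x hx
          rcases List.mem_cons.mp hx with rfl | hx'
          · exact hc
          · have := List.mem_takeWhile_imp hx'
            simpa using this
        have hsplit : c :: r = (c :: r.takeWhile (· != '-')) ++ r.dropWhile (· != '-') := by
          simp [List.takeWhile_append_dropWhile]
        rw [hsplit, pv_squeeze_run _ _ hrun]
        have hlstrip : pvLstrip ((c :: r.takeWhile (· != '-')) ++ pvSqueeze (r.dropWhile (· != '-'))) =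
            (c :: r.takeWhile (· != '-')) ++ pvSqueeze (r.dropWhile (· != '-')) := by
          simp only [pvLstrip, List.cons_append]
          rw [List.dropWhile_cons]
          rw [if_neg (by rw [hc]; simp)]
        rw [hlstrip, pv_rstrip_append _ _ hrun]
        rw [← hsplit, pv_tokens_cons_ne c r hc, pv_intercalate_cons]
        congr 1
        rcases pv_dropWhile_head r (· != '-') with hnil | ⟨e, t, het, hpe⟩
        · rw [hnil]
          simp [pvSqueeze, pvRstrip, pv_tokens_nil]
        · have he : e = '-' := by simpa using hpe
          subst he
          rw [het, pv_squeeze_dash, pv_rstrip_cons]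
          have hY : pvLstrip (pvSqueeze (t.dropWhile (· == '-'))) =
              pvSqueeze (t.dropWhile (· == '-')) := by
            rcases pv_dropWhile_head t (· == '-') with hnil' | ⟨e', t', het', hpe'⟩
            · rw [hnil']; rfl
            · rw [het']
              have hh := pv_squeeze_head (e' :: t') (by simp)
              unfold pvLstrip
              rcases hq : pvSqueeze (e' :: t') with _ | ⟨q, qs⟩
              · rfl
              · rw [hq] at hh
                simp only [List.head?_cons, Option.some.injEq] at hh
                subst hh
                simp [List.dropWhile_cons, hpe']
          have hlent : (t.dropWhile (· == '-')).length ≤ n := by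
            have h1 : (t.dropWhile (· == '-')).length ≤ t.length := List.length_dropWhile_le _ _
            have h2 : ('-' :: t).length ≤ r.length := by
              rw [← het]; exact List.length_dropWhile_le _ _
            simp only [List.length_cons] at h2
            omega
          have hIH := ih (t.dropWhile (· == '-')) hlent
          rw [hY] at hIH
          rw [hIH]
          have htok2 : pvTokens ('-' :: t) = pvTokens (t.dropWhile (· == '-')) := by
            rw [pv_tokens_dropDash, pv_tokens_cons_dash]
          rw [htok2]
          rw [pv_intercalate_empty_iff _ (pv_tokens_ne_nil _)]
          by_cases hemp : (pvTokens (t.dropWhile (· == '-'))).isEmpty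
          · simp [hemp]
          · simp [hemp]

theorem pv_splitH_ne_nil (l : List Char) : pvSplitH l ≠ [] := by
  induction l with
  | nil => simp [pvSplitH]
  | cons c t ih =>
    rw [pvSplitH_cons]
    cases hc : (c == '-') with
    | true => simp
    | false =>
      simp only [Bool.false_eq_true, if_false]
      rcases hq : pvSplitH t with _ | ⟨p, ps⟩
      · exact absurd hq ih
      · simp

theorem pv_splitH_struct (r : List Char) :
    pvSplitH r = (r.takeWhile (· != '-')) ::
      (match r.dropWhile (· != '-') with | [] => [] | _ :: r' => pvSplitH r') := by
  induction r with
  | nil => rfl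
  | cons c t ih =>
    cases hc : (c == '-') with
    | true =>
      have hc' : c = '-' := beq_iff_eq.mp hc
      subst hc'
      rw [pvSplitH_cons, if_pos hc]
      simp [List.takeWhile_cons, List.dropWhile_cons]
    | false =>
      have hbne : (c != '-') = true := by simp [bne, hc]
      rw [pvSplitH_cons, if_neg (by rw [hc]; simp), ih]
      rw [List.takeWhile_cons, if_pos hbne, List.dropWhile_cons, if_pos hbne]

theorem pv_splitOn_go : ∀ (fuel : ℕ) (l cur : List Char) (acc : List (List Char)),
    l.length < fuel →
    PySem.Chars.splitOn.go ['-'] fuel l cur acc =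
      acc.reverse ++ (match pvSplitH l with
        | p :: ps => (cur.reverse ++ p) :: ps
        | [] => [cur.reverse]) := by
  intro fuel
  induction fuel with
  | zero => intro l cur acc h; exact absurd h (Nat.not_lt_zero _)
  | succ n ih =>
    intro l cur acc h
    match l with
    | [] => simp [PySem.Chars.splitOn.go, pvSplitH]
    | c :: t =>
      rw [PySem.Chars.splitOn.go]
      simp only [List.length_cons] at h
      cases hc : (c == '-') with
      | true =>
        have hc' : c = '-' := beq_iff_eq.mp hc
        subst hc'
        rw [if_pos (by rw [pv_pre_one]; simp)]
        rw [ih (List.drop ['-'].length ('-' :: t)) [] (cur.reverse :: acc) (by simp; omega)]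
        rcases hq : pvSplitH t with _ | ⟨p, ps⟩
        · exact absurd hq (pv_splitH_ne_nil t)
        · rw [pvSplitH_cons, if_pos (show (('-' : Char) == '-') = true from rfl), hq]
          simp [hq]
      | false =>
        rw [if_neg (by
          rw [pv_pre_one]
          simp only [Bool.and_true, beq_iff_eq]
          intro hco
          rw [← hco] at hc
          simp at hc)]
        rw [ih t (c :: cur) acc (by omega)]
        rcases hq : pvSplitH t with _ | ⟨p, ps⟩
        · exact absurd hq (pv_splitH_ne_nil t)
        · rw [pvSplitH_cons, if_neg (by simpa using hc), hq]
          simp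

theorem pv_splitOn_eq (cs : List Char) :
    PySem.Chars.splitOn cs ['-'] = pvSplitH cs := by
  rw [PySem.Chars.splitOn]
  rw [pv_splitOn_go (cs.length + 1) cs [] [] (by omega)]
  rcases hq : pvSplitH cs with _ | ⟨p, ps⟩
  · exact absurd hq (pv_splitH_ne_nil cs)
  · simp

theorem pv_M2 : ∀ (n : ℕ) (ds : List Char), ds.length ≤ n →
    (pvSplitH ds).filter (fun p => !p.isEmpty) = pvTokens ds := by
  intro n
  induction n with
  | zero =>
    intro ds h
    have hl : ds = [] := List.eq_nil_of_length_eq_zero (Nat.le_zero.mp h)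
    subst hl
    simp [pvSplitH, pv_tokens_nil]
  | succ n ih =>
    intro ds h
    match ds with
    | [] => simp [pvSplitH, pv_tokens_nil]
    | c :: r =>
      simp only [List.length_cons] at h
      cases hc : (c == '-') with
      | true =>
        have hc' : c = '-' := beq_iff_eq.mp hc
        subst hc'
        rw [pvSplitH_cons, if_pos hc, pv_tokens_cons_dash, ← ih r (by omega)]
        simp
      | false =>
        rw [pv_splitH_struct (c :: r)]
        have hbne : (c != '-') = true := by simp [bne, hc]
        have h1 : (c :: r).takeWhile (· != '-') = c :: r.takeWhile (· != '-') := by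
          rw [List.takeWhile_cons, if_pos hbne]
        have h2 : (c :: r).dropWhile (· != '-') = r.dropWhile (· != '-') := by
          rw [List.dropWhile_cons, if_pos hbne]
        rw [h1, h2, pv_tokens_cons_ne c r hc]
        rcases pv_dropWhile_head r (· != '-') with hnil | ⟨e, t, het, hpe⟩
        · rw [hnil]
          simp [pv_tokens_nil]
        · have he : e = '-' := by simpa using hpe
          subst he
          rw [het]
          have hlent : t.length ≤ n := by
            have h2' : ('-' :: t).length ≤ r.length := by
              rw [← het]; exact List.length_dropWhile_le _ _
            simp only [List.length_cons] at h2'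
            omega
          rw [pv_tokens_cons_dash, ← ih t hlent]
          simp

theorem pv_replace_space (cs : List Char) :
    PySem.Chars.replace cs [' '] ['-'] = cs.map (fun c => if c == ' ' then '-' else c) := by
  have hgo : ∀ (fuel : ℕ) (l acc : List Char), l.length ≤ fuel →
      PySem.Chars.replace.go [' '] ['-'] fuel l acc =
        acc.reverse ++ l.map (fun c => if c == ' ' then '-' else c) := by
    intro fuel
    induction fuel with
    | zero =>
      intro l acc h
      have hl : l = [] := List.eq_nil_of_length_eq_zero (Nat.le_zero.mp h)
      subst hl
      simp [PySem.Chars.replace.go]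
    | succ n ih =>
      intro l acc h
      match l with
      | [] => simp [PySem.Chars.replace.go]
      | c :: t =>
        rw [PySem.Chars.replace.go]
        simp only [List.length_cons] at h
        cases hc : (c == ' ') with
        | true =>
          have hc' : c = ' ' := beq_iff_eq.mp hc
          subst hc'
          rw [if_pos (by rw [pv_pre_one]; simp)]
          rw [ih (List.drop [' '].length (' ' :: t)) (['-'].reverse ++ acc) (by simp; omega)]
          simp
        | false =>
          rw [if_neg (by
            rw [pv_pre_one]
            simp only [Bool.and_true, beq_iff_eq]
            intro hco
            rw [← hco] at hc
            simp at hc)]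
          rw [ih t (c :: acc) (by omega)]
          have hc' : ¬ c = ' ' := by simpa using hc
          simp [hc']
  rw [PySem.Chars.replace]
  rw [if_neg (by decide)]
  simpa using hgo cs.length cs [] le_rfl

theorem pv_main (X : List Char) :
    PySem.Chars.stripChars (pvCollapse X) ['-'] =
      PySem.Chars.join ['-'] ((PySem.Chars.splitOn X ['-']).filter (fun p => !p.isEmpty)) := by
  rw [pv_collapse_eq, pv_stripChars_eq, pv_splitOn_eq]
  rw [pv_M2 X.length X le_rfl]
  rw [pv_M1 X.length X le_rfl]
  rfl

theorem pv_cleaned (cs : List Char) :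
    (cs.map (fun c => if c == ' ' then '-' else c)).filter
        (fun c => PySem.Chars.isalnum c || c == '-') =
      (cs.filter (fun c => PySem.Chars.isalnum c || c == ' ' || c == '-')).map
        (fun c => if c == ' ' then '-' else c) := by
  rw [List.filter_map]
  congr 1
  apply List.filter_congr
  intro c _
  cases hc : (c == ' ') with
  | true =>
    have hc' : c = ' ' := beq_iff_eq.mp hc
    subst hc'
    decide
  | false =>
    have hc' : ¬ c = ' ' := by simpa using hc
    simp [Function.comp, hc, hc']

theorem pv_guard (d : PySem.Dict String (List (String × String))) (k s : String) :
    (if d.contains k = true then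
      if (PySem.Dict.mk ((d.get? k).getD [])).contains s = true then
        (PySem.Dict.mk ((d.get? k).getD [])).get? s
      else none
    else none) =
    (match d.get? k with
     | some n => (PySem.Dict.mk n).get? s
     | none => none) := by
  rcases hk : d.get? k with _ | nn
  · rw [PySem.Dict.contains_eq_isSome_get?, hk]
    simp
  · rw [PySem.Dict.contains_eq_isSome_get?, hk]
    simp only [Option.isSome_some, Option.getD_some]
    rw [if_pos trivial]
    show _ = (PySem.Dict.mk nn).get? s
    rcases hs : (PySem.Dict.mk nn).get? s with _ | v
    · rw [PySem.Dict.contains_eq_isSome_get?, hs]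
      simp
    · rw [PySem.Dict.contains_eq_isSome_get?, hs]
      simp

-- ===== VERDICT (by name: the statement is the Claim_ definition above) =====
theorem normalize_tag_spec : Claim_equal_normalize_tag := by
  intro tag rules _hdom
  unfold Spec_normalize_tag
  simp only [normalize_tag, normalize_tag_alt]
  rw [pv_guard, pv_guard]
  rcases h1 : (PySem.Dict.mk rules).get? "normalizations" with _ | nn
  · simp only [h1]
    rcases h3 : (PySem.Dict.mk rules).get? "url_normalizations" with _ | uu
    · simp only [h3]
      simp only [pvDefaultB]
      rw [pv_replace_space, pv_cleaned, pv_main]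
    · simp only [h3]
      rcases h4 : (PySem.Dict.mk uu).get? tag with _ | v
      · simp only [h4]
        simp only [pvDefaultB]
        rw [pv_replace_space, pv_cleaned, pv_main]
      · simp only [h4]
  · simp only [h1]
    rcases h2 : (PySem.Dict.mk nn).get? (PySem.Str.strip (PySem.Str.lower tag)) with _ | v
    · simp only [h2]
      rcases h3 : (PySem.Dict.mk rules).get? "url_normalizations" with _ | uu
      · simp only [h3]
        simp only [pvDefaultB]
        rw [pv_replace_space, pv_cleaned, pv_main]
      · simp only [h3]
        rcases h4 : (PySem.Dict.mk uu).get? tag with _ | v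
        · simp only [h4]
          simp only [pvDefaultB]
          rw [pv_replace_space, pv_cleaned, pv_main]
        · simp only [h4]
    · simp only [h2]
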